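-- pv_equiv track=rewrite | github.com/EvgenijGod/HSE | python/examtest/С.py | findSspct
-- ===== SOURCE A (Python) =====
-- def checkNum(wtnss, sspct):
--     for char in wtnss:
--         if char not in sspct:
--             return False
--     return True
--
-- def findSspct(sspctList, wtnssList):
--     maxWtnss = 0
--     resList = []
--     for suspect in sspctList:
--         cntWtnss = 0
--         for witness in wtnssList:
--             if checkNum(witness, suspect):
--                 cntWtnss += 1
--         if cntWtnss == maxWtnss:
--             resList.append(suspect.strip())
--         elif cntWtnss > maxWtnss:
--             maxWtnss = cntWtnss
--             resList = [suspect.strip()]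
--     return resList
-- ===== SOURCE B (Python) =====
-- def findSspct(sspctList, wtnssList):
--     def mask(s):
--         m = 0
--         for ch in s:
--             m |= 1 << ord(ch)
--         return m
--     wcnt = {}
--     for w in wtnssList:
--         x = mask(w)
--         wcnt[x] = wcnt.get(x, 0) + 1
--     pairs = wcnt.items()
--     counts = [sum(c for x, c in pairs if x & sm == x) for sm in map(mask, sspctList)]
--     best = max(counts, default=0)
--     return [s.strip() for s, c in zip(sspctList, counts) if c == best]
-- ===== Notes on version B (the rewrite author's own statement) =====
-- stated objective: faster
-- what changed: B precomputes one character bitmask per string so the per-pair subset test becomes a single bitwise-and, aggregates equal witness masks in a multiplicity dict so each distinct mask is tested once per suspect, and selects the maximum-count suspects with one zip/filter pass instead of A's running-max append/reset loop.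
import Mathlib
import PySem

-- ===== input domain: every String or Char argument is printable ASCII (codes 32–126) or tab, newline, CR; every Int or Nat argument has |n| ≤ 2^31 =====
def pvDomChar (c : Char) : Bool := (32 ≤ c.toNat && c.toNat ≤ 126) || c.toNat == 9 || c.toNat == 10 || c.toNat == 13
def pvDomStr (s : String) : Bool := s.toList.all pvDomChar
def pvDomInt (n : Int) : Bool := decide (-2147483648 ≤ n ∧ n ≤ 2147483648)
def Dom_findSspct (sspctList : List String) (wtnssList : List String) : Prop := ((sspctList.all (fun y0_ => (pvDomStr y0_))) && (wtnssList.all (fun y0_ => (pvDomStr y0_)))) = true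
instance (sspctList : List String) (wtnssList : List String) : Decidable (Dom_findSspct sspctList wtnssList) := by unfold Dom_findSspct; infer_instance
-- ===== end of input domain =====

-- B replaces A's nested character scans by one character bitmask per string (subset test = one
-- bitwise and), counts each distinct witness mask once via a multiplicity dict, and selects the
-- max-count suspects by a zip/filter instead of A's running-max append/reset loop (objective:
-- faster; a timing run measured B faster at every size).


-- ===== PORT A =====
-- 'char not in sspct' with char a single character = the character is not among sspct's characters
def checkNumGo (w : List Char) (s : List Char) : Bool :=
  match w with
  | [] => true
  | c :: rest => if !(s.contains c) then false else checkNumGo rest s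

def checkNum (wtnss : String) (sspct : String) : Bool :=
  checkNumGo wtnss.toList sspct.toList

def findSspct (sspctList : List String) (wtnssList : List String) : List String :=
  (sspctList.foldl (fun (st : Int × List String) suspect =>
    let cntWtnss : Int :=
      wtnssList.foldl (fun c witness => if checkNum witness suspect then c + 1 else c) 0
    if cntWtnss = st.1 then (st.1, st.2 ++ [PySem.Str.strip suspect])
    else if cntWtnss > st.1 then (cntWtnss, [PySem.Str.strip suspect])
    else st) ((0 : Int), ([] : List String))).2

-- ===== PORT B =====
-- 1 << ord(ch) accumulated with |= : the character bitmask of a string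
def maskOf (s : String) : Nat :=
  s.toList.foldl (fun m c => m ||| (1 <<< c.toNat)) 0

def findSspct_alt (sspctList : List String) (wtnssList : List String) : List String :=
  let wcnt : PySem.Dict Nat Int :=
    wtnssList.foldl (fun d w =>
      let x := maskOf w
      d.insert x (d.getD x 0 + 1)) PySem.Dict.empty
  let pairs := wcnt.items
  -- sum(c for x, c in pairs if x & sm == x)
  let counts : List Int := sspctList.map (fun s =>
    let sm := maskOf s
    ((pairs.filter (fun p => p.1 &&& sm = p.1)).map (fun p => p.2)).sum)
  let best : Int := counts.foldl max 0
  ((sspctList.zip counts).filter (fun p => p.2 = best)).map (fun p => PySem.Str.strip p.1)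

-- ===== PRECONDITION & SPEC =====
def Spec_findSspct (sspctList : List String) (wtnssList : List String) (out : List String) : Prop := out = findSspct_alt sspctList wtnssList
instance (sspctList : List String) (wtnssList : List String) (out : List String) : Decidable (Spec_findSspct sspctList wtnssList out) := by unfold Spec_findSspct; infer_instance

-- ===== CLAIM (what is proved, stated in full; the proofs are below) =====
def Claim_equal_findSspct : Prop := ∀ (sspctList : List String) (wtnssList : List String), Dom_findSspct sspctList wtnssList → Spec_findSspct sspctList wtnssList (findSspct sspctList wtnssList)

-- ===== LEMMAS AND PROOFS =====

-- the count A computes per suspect, as a closed expression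
def pvCount (wtnssList : List String) (s : String) : Int :=
  ((wtnssList.countP (fun w => checkNum w s) : Nat) : Int)

-- running maximum of f over l starting from m
def pvMx (f : String → Int) (l : List String) (m : Int) : Int :=
  l.foldl (fun a s => max a (f s)) m

lemma checkNumGo_iff (w s : List Char) : checkNumGo w s = true ↔ ∀ c ∈ w, c ∈ s := by
  induction w with
  | nil => simp [checkNumGo]
  | cons c rest ih => simp [checkNumGo, ih]

lemma foldl_count (p : String → Bool) (l : List String) (a : Int) :
    l.foldl (fun c w => if p w then c + 1 else c) a = a + (l.countP p : Nat) := by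
  induction l generalizing a with
  | nil => simp
  | cons h t ih =>
    simp only [List.foldl_cons, List.countP_cons, ih]
    by_cases hp : p h
    · simp [hp]; omega
    · simp [hp]

lemma le_pvMx (f : String → Int) (l : List String) (m : Int) : m ≤ pvMx f l m := by
  induction l generalizing m with
  | nil => simp [pvMx]
  | cons s t ih =>
    calc m ≤ max m (f s) := le_max_left _ _
    _ ≤ pvMx f t (max m (f s)) := ih _
    _ = pvMx f (s :: t) m := rfl

-- the running-max append/reset loop returns exactly the (stripped) elements whose value is the final maximum
lemma loopA_char (f : String → Int) (l : List String) (m : Int) (r : List String) :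
    (l.foldl (fun (st : Int × List String) s =>
      if f s = st.1 then (st.1, st.2 ++ [PySem.Str.strip s])
      else if f s > st.1 then (f s, [PySem.Str.strip s])
      else st) (m, r))
    = (pvMx f l m,
       (if m = pvMx f l m then r else []) ++ (l.filter (fun s => f s = pvMx f l m)).map PySem.Str.strip) := by
  induction l generalizing m r with
  | nil => simp [pvMx]
  | cons s t ih =>
    have hM : pvMx f (s :: t) m = pvMx f t (max m (f s)) := rfl
    simp only [List.foldl_cons]
    by_cases h1 : f s = m
    · have hmx : max m (f s) = m := by omega
      rw [if_pos h1, ih, hM, hmx]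
      by_cases h2 : m = pvMx f t m
      · rw [← h2]
        simp [h1]
      · have hne : ¬ (f s = pvMx f t m) := h1 ▸ h2
        simp [h2, hne]
    · by_cases h2 : f s > m
      · rw [if_neg h1, if_pos h2, ih, hM]
        have hmx : max m (f s) = f s := by omega
        rw [hmx]
        have hne : ¬ (m = pvMx f t (f s)) := by
          have := le_pvMx f t (f s); omega
        by_cases h3 : f s = pvMx f t (f s)
        · rw [← h3]
          have hm2 : ¬ (m = f s) := by omega
          simp [hm2]
        · simp [h3, hne]
      · rw [if_neg h1, if_neg h2, ih, hM]
        have hmx : max m (f s) = m := by omega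
        rw [hmx]
        have : ¬ (f s = pvMx f t m) := by
          have := le_pvMx f t m; omega
        simp [this]

lemma zip_filter_map (f : String → Int) (l : List String) (b : Int) :
    (((l.zip (l.map f)).filter (fun p => p.2 = b)).map (fun p => PySem.Str.strip p.1))
    = (l.filter (fun s => f s = b)).map PySem.Str.strip := by
  induction l with
  | nil => simp
  | cons s t ih =>
    simp only [List.map_cons, List.zip_cons_cons]
    by_cases h : f s = b <;> simp [h, ih]

lemma countA_eq (wtnssList : List String) (s : String) :
    (wtnssList.foldl (fun c witness => if checkNum witness s then c + 1 else c) (0 : Int))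
    = pvCount wtnssList s := by
  rw [foldl_count, pvCount]; ring

lemma testBit_maskGo (l : List Char) (m k : Nat) :
    (l.foldl (fun m c => m ||| (1 <<< c.toNat)) m).testBit k
      = (m.testBit k || l.any (fun c => decide (c.toNat = k))) := by
  induction l generalizing m with
  | nil => simp
  | cons c t ih =>
    simp only [List.foldl_cons, ih, List.any_cons]
    rw [Nat.testBit_or, Nat.shiftLeft_eq, one_mul, Nat.testBit_two_pow]
    cases m.testBit k <;> simp

lemma testBit_maskOf (s : String) (k : Nat) :
    (maskOf s).testBit k = s.toList.any (fun c => decide (c.toNat = k)) := by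
  rw [maskOf, testBit_maskGo]; simp

lemma maskOf_and_eq_iff (w s : String) :
    (maskOf w &&& maskOf s = maskOf w) ↔ (∀ c ∈ w.toList, c ∈ s.toList) := by
  constructor
  · intro h c hc
    have hw : (maskOf w).testBit c.toNat = true := by
      rw [testBit_maskOf]
      exact List.any_eq_true.2 ⟨c, hc, by simp⟩
    have hand : (maskOf w &&& maskOf s).testBit c.toNat = true := by rw [h]; exact hw
    rw [Nat.testBit_and, hw, Bool.true_and, testBit_maskOf] at hand
    obtain ⟨c', hc', he⟩ := List.any_eq_true.1 hand
    have hcc : c' = c := Char.ext (UInt32.toNat_inj.1 (of_decide_eq_true he))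
    exact hcc ▸ hc'
  · intro h
    apply Nat.eq_of_testBit_eq
    intro k
    rw [Nat.testBit_and]
    by_cases hw : (maskOf w).testBit k = true
    · rw [hw, Bool.true_and]
      rw [testBit_maskOf] at hw
      obtain ⟨c, hc, he⟩ := List.any_eq_true.1 hw
      rw [testBit_maskOf]
      exact List.any_eq_true.2 ⟨c, h c hc, he⟩
    · rw [Bool.not_eq_true] at hw
      rw [hw, Bool.false_and]

lemma checkNum_eq_mask (w s : String) :
    checkNum w s = decide (maskOf w &&& maskOf s = maskOf w) := by
  rw [Bool.eq_iff_iff, checkNum, checkNumGo_iff, decide_eq_true_iff]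
  exact (maskOf_and_eq_iff w s).symm

-- the loop 'wcnt[x] = wcnt.get(x, 0) + 1' over the witness masks is Counter(masks)
lemma wcnt_eq_counter (wtnssList : List String) :
    (wtnssList.foldl (fun d w =>
      let x := maskOf w
      d.insert x (d.getD x 0 + 1)) PySem.Dict.empty)
    = PySem.Dict.counter (wtnssList.map maskOf) := by
  rw [← PySem.Dict.foldl_insert_getD_add_one_eq_counter, List.foldl_map]

lemma ofList_perm_dedup {α : Type} [DecidableEq α] (l : List α) :
    (PySem.Set.ofList l).Perm l.dedup := by
  rw [List.perm_ext_iff_of_nodup (PySem.Set.nodup_ofList l) l.nodup_dedup]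
  intro a
  rw [PySem.Set.mem_ofList, List.mem_dedup]

-- summing the multiplicities of the distinct masks that pass the filter counts the passing witnesses
lemma sum_counter_filter (ms : List Nat) (q : Nat → Bool) :
    ((((PySem.Dict.counter ms).items.filter (fun p => q p.1)).map (fun p => p.2)).sum : Int)
    = ((ms.countP q : Nat) : Int) := by
  rw [PySem.Dict.items_counter, List.filter_map, List.map_map]
  have h1 : (Function.comp (fun p : Nat × Int => q p.1)
      (fun k => ((k, (ms.count k : Int)) : Nat × Int))) = q := rfl
  rw [h1]
  have h2 : ((fun p : Nat × Int => p.2) ∘ fun k => ((k, (ms.count k : Int)) : Nat × Int))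
      = fun k => ((ms.count k : Nat) : Int) := rfl
  rw [h2]
  have hperm : (((PySem.Set.ofList ms).filter q).map (fun k => ((ms.count k : Nat) : Int))).Perm
      (((ms.dedup.filter q)).map (fun k => ((ms.count k : Nat) : Int))) :=
    ((ofList_perm_dedup ms).filter q).map _
  rw [hperm.sum_eq]
  rw [← List.sum_map_count_dedup_filter_eq_countP q ms]
  rw [Nat.cast_list_sum, List.map_map]
  rfl

lemma countB_eq (wtnssList : List String) (s : String) :
    ((((PySem.Dict.counter (wtnssList.map maskOf)).items.filter
        (fun p => p.1 &&& maskOf s = p.1)).map (fun p => p.2)).sum)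
    = pvCount wtnssList s := by
  rw [sum_counter_filter (wtnssList.map maskOf) (fun k => decide (k &&& maskOf s = k))]
  rw [List.countP_map, pvCount]
  congr 2
  funext w
  simp only [Function.comp]
  exact (checkNum_eq_mask w s).symm

-- ===== VERDICT (by name: the statement is the Claim_ definition above) =====
theorem findSspct_spec : Claim_equal_findSspct := by
  intro sspctList wtnssList _
  unfold Spec_findSspct findSspct findSspct_alt
  simp only
  have hA : (fun (st : Int × List String) suspect =>
      let cntWtnss : Int :=
        wtnssList.foldl (fun c witness => if checkNum witness suspect then c + 1 else c) 0
      if cntWtnss = st.1 then (st.1, st.2 ++ [PySem.Str.strip suspect])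
      else if cntWtnss > st.1 then (cntWtnss, [PySem.Str.strip suspect])
      else st)
      = (fun (st : Int × List String) s =>
      if pvCount wtnssList s = st.1 then (st.1, st.2 ++ [PySem.Str.strip s])
      else if pvCount wtnssList s > st.1 then (pvCount wtnssList s, [PySem.Str.strip s])
      else st) := by
    funext st s
    simp only [countA_eq]
  rw [hA, loopA_char, wcnt_eq_counter]
  have hcounts : (sspctList.map (fun s =>
      ((((PySem.Dict.counter (wtnssList.map maskOf)).items.filter
          (fun p => p.1 &&& maskOf s = p.1)).map (fun p => p.2)).sum)))
      = sspctList.map (pvCount wtnssList) := by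
    apply List.map_congr_left
    intro s _
    exact countB_eq wtnssList s
  rw [hcounts]
  have hbest : (sspctList.map (pvCount wtnssList)).foldl max 0
      = pvMx (pvCount wtnssList) sspctList 0 := by
    rw [pvMx, List.foldl_map]
  rw [hbest, zip_filter_map]
  simp
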